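-- pv_equiv track=rewrite | github.com/LianjiaTech/bella-rag | app/utils/convert.py | get_root_paths_from_paths
-- ===== SOURCE A (Python) =====
-- from typing import List, Dict, Union, Any
--
-- def get_root_paths_from_paths(paths: List[List]) -> List[List]:
--     """
--     从路径列表中获取最短的路径，删除被更短路径包含的路径
--
--     如果一个路径是另一个路径的前缀，则保留较短的路径，删除较长的路径
--
--     Args:
--         paths: 所有节点的路径列表
--
--     Returns:
--         去重后的最短路径列表
--     """
--     if not paths:
--         return []
--
--     # 按路径长度排序，短的在前
--     sorted_paths = sorted(paths, key=len)
--     result = []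
--
--     for path in sorted_paths:
--         # 检查当前路径是否被结果中的任何路径包含
--         is_contained = False
--         for existing_path in result:
--             # 如果existing_path是path的前缀，则path被包含
--             if (len(existing_path) <= len(path) and
--                 path[:len(existing_path)] == existing_path):
--                 is_contained = True
--                 break
--
--         # 如果当前路径没有被包含，加入结果
--         if not is_contained:
--             result.append(path)
--
--     return sorted(result)
-- ===== SOURCE B (Python) =====
-- def get_root_paths_from_paths(paths):
--     """Keep only paths that have no kept prefix: one pass in length order with a
--     set of kept tuples, checking each path's prefixes by set lookups."""
--     kept = set()
--     for p in sorted(paths, key=len):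
--         t = tuple(p)
--         if all(t[:i] not in kept for i in range(len(t) + 1)):
--             kept.add(t)
--     return sorted(list(t) for t in kept)
-- ===== Notes on version B (the rewrite author's own statement) =====
-- stated objective: alternative
-- what changed: Replaces A's inner scan of the kept list with per-path prefix lookups in a hash set of kept tuples, built in one pass over the length-sorted input.
import Mathlib
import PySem

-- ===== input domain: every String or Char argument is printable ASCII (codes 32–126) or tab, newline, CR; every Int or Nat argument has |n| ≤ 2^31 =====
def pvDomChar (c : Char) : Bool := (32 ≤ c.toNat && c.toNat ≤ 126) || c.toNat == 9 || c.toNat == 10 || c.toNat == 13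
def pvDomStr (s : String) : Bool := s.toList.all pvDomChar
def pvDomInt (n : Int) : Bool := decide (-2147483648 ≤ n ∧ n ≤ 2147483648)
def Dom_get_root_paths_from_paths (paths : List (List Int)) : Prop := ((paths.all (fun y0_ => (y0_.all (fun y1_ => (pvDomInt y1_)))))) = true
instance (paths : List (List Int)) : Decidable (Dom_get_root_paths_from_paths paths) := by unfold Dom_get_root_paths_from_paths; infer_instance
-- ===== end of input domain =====

-- B replaces A's inner scan of the kept list by lookups of the current path's
-- prefixes in a set of kept tuples (objective: alternative).

-- ===== PORT A =====
def get_root_paths_from_paths (paths : List (List Int)) : List (List Int) :=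
  if paths = [] then []
  else
    let sorted_paths := PySem.List.sorted paths (fun p => p.length) false
    let result := sorted_paths.foldl (fun result path =>
      -- inner for-loop with break: is_contained = any existing prefix-of path
      let is_contained := result.any (fun existing_path =>
        decide (existing_path.length ≤ path.length) &&
          (PySem.List.slice path none (some (existing_path.length : Int)) == existing_path))
      if is_contained then result else result ++ [path]) []
    PySem.List.sorted result (fun x => x) false

-- ===== PORT B =====
def get_root_paths_from_paths_alt (paths : List (List Int)) : List (List Int) :=
  let kept : PySem.Set (List Int) :=
    (PySem.List.sorted paths (fun p => p.length) false).foldl (fun kept p =>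
      if (PySem.List.pyRange 0 ((p.length : Int) + 1) 1).all
           (fun i => !(PySem.Set.contains kept (PySem.List.slice p none (some i)))) then
        PySem.Set.add kept p
      else kept) PySem.Set.empty
  PySem.List.sorted kept (fun x => x) false

-- ===== PRECONDITION & SPEC =====
def Spec_get_root_paths_from_paths (paths : List (List Int)) (out : List (List Int)) : Prop := out = get_root_paths_from_paths_alt paths
instance (paths : List (List Int)) (out : List (List Int)) : Decidable (Spec_get_root_paths_from_paths paths out) := by unfold Spec_get_root_paths_from_paths; infer_instance

-- ===== CLAIM (what is proved, stated in full; the proofs are below) =====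
def Claim_equal_get_root_paths_from_paths : Prop := ∀ (paths : List (List Int)), Dom_get_root_paths_from_paths paths → Spec_get_root_paths_from_paths paths (get_root_paths_from_paths paths)

-- ===== LEMMAS AND PROOFS =====

theorem pv_step_cond (r : List (List Int)) (p : List Int) :
    (r.any (fun existing_path =>
        decide (existing_path.length ≤ p.length) &&
          (PySem.List.slice p none (some (existing_path.length : Int)) == existing_path)))
    = !((PySem.List.pyRange 0 ((p.length : Int) + 1) 1).all
          (fun i => !(PySem.Set.contains r (PySem.List.slice p none (some i))))) := by
  rw [Bool.eq_iff_iff]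
  simp only [List.any_eq_true, Bool.and_eq_true, decide_eq_true_eq, beq_iff_eq,
    Bool.not_eq_true', List.all_eq_false, Bool.not_eq_false, PySem.Set.contains_iff,
    PySem.List.mem_pyRange_one]
  constructor
  · rintro ⟨e, he, hle, hsl⟩
    refine ⟨(e.length : Int), ⟨by positivity, by exact_mod_cast Nat.lt_succ_of_le hle⟩, ?_⟩
    rwa [hsl]
  · rintro ⟨i, ⟨h0, hi⟩, hmem⟩
    refine ⟨PySem.List.slice p none (some i), hmem, ?_, ?_⟩
    · rw [PySem.List.slice_to _ h0]
      simp [List.length_take]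
    · rw [PySem.List.slice_to _ h0, List.length_take]
      rw [PySem.List.slice_to]
      · simp [List.take_eq_take_min]
        omega
      · positivity

theorem pv_folds (xs : List (List Int)) (acc : List (List Int)) :
    xs.foldl (fun result path =>
      let is_contained := result.any (fun existing_path =>
        decide (existing_path.length ≤ path.length) &&
          (PySem.List.slice path none (some (existing_path.length : Int)) == existing_path))
      if is_contained then result else result ++ [path]) acc
    = xs.foldl (fun kept p =>
      if (PySem.List.pyRange 0 ((p.length : Int) + 1) 1).all
           (fun i => !(PySem.Set.contains kept (PySem.List.slice p none (some i)))) then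
        PySem.Set.add kept p
      else kept) acc := by
  induction xs generalizing acc with
  | nil => rfl
  | cons x t ih =>
    simp only [List.foldl_cons]
    rw [show (let is_contained := acc.any (fun existing_path =>
        decide (existing_path.length ≤ x.length) &&
          (PySem.List.slice x none (some (existing_path.length : Int)) == existing_path));
      if is_contained then acc else acc ++ [x]) =
      (if acc.any (fun existing_path =>
        decide (existing_path.length ≤ x.length) &&
          (PySem.List.slice x none (some (existing_path.length : Int)) == existing_path))
       then acc else acc ++ [x]) from rfl]
    rw [pv_step_cond]
    by_cases h : (PySem.List.pyRange 0 ((x.length : Int) + 1) 1).all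
           (fun i => !(PySem.Set.contains acc (PySem.List.slice x none (some i)))) = true
    · rw [h]
      have hx : x ∉ acc := by
        have := (List.all_eq_true.mp h) ((x.length : Int))
          (by rw [PySem.List.mem_pyRange_one]; constructor <;> [positivity; omega])
        rw [Bool.not_eq_true', PySem.List.slice_to_natCast, List.take_length] at this
        simpa using this
      rw [PySem.Set.add_of_not_mem hx]
      simp only [Bool.not_true, Bool.false_eq_true, if_false, if_true]
      exact ih _
    · rw [Bool.not_eq_true] at h
      rw [h]
      simp only [Bool.not_false, if_true, Bool.false_eq_true, if_false]
      exact ih _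

-- ===== VERDICT (by name: the statement is the Claim_ definition above) =====
theorem get_root_paths_from_paths_spec : Claim_equal_get_root_paths_from_paths := by
  intro paths _
  unfold Spec_get_root_paths_from_paths get_root_paths_from_paths get_root_paths_from_paths_alt
  by_cases h : paths = []
  · subst h; rfl
  · rw [if_neg h]
    simp only []
    rw [pv_folds]
    rfl
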